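-- pv_equiv track=rewrite | github.com/ethanjones-git/newsFeedApp | polypinion.py | check_lists_similarity
-- ===== SOURCE A (Python) =====
-- def check_lists_similarity(lists):
--     if not lists:
--         return False  # If no lists provided, return False
--
--     for i in range(len(lists[0])):
--         # Create a dictionary to count occurrences of each letter at position i
--         letter_count = {}
--
--         # Iterate through each list and count occurrences of the letter at position i
--         for lst in lists:
--             if i < len(lst):  # Ensure index is within range
--                 letter = lst[i]
--                 if letter in letter_count:
--                     letter_count[letter] += 1
--                 else:
--                     letter_count[letter] = 1
--
--         # Check if any letter occurred at least 3 times at position i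
--         for count in letter_count.values():
--             if count >= 3:
--                 return True  # At least 3 lists have the same letter at position i
--
--     return False  # No position found where at least 3 lists have the same letter
-- ===== SOURCE B (Python) =====
-- def check_lists_similarity(lists):
--     if not lists:
--         return False
--     n = len(lists[0])
--     counts = {}
--     for lst in lists:
--         for p in enumerate(lst[:n]):
--             counts[p] = counts.get(p, 0) + 1
--     return any(c >= 3 for c in counts.values())
-- ===== Notes on version B (the rewrite author's own statement) =====
-- stated objective: alternative
-- what changed: Replaces the per-position rescans of all lists (a fresh per-column dict for each index of lists[0]) by one single pass that builds a global counter keyed by (position, letter) and then checks its values once.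
import Mathlib
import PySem

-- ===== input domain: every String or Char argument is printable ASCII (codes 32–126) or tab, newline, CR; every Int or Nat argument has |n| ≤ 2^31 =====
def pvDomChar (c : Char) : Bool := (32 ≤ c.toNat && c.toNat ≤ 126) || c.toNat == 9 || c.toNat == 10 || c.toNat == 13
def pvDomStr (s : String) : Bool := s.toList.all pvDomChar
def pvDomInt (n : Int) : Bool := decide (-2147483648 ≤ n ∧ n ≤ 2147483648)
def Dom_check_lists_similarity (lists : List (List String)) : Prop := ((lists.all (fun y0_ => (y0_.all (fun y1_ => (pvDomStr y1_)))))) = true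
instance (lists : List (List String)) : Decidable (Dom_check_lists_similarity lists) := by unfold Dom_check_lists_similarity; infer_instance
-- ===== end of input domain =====

-- B replaces A's per-position rescans of all lists by one single pass building a global counter keyed by (position, letter); objective: alternative (same cost).


-- ===== PORT A =====
def check_lists_similarity (lists : List (List String)) : Bool :=
  match lists with
  | [] => false
  | first :: rest =>
    (PySem.List.pyRange 0 (first.length : Int) 1).any (fun i =>
      let letter_count := (first :: rest).foldl (fun d lst =>
        if i < (lst.length : Int) then
          let letter := PySem.List.pyGetD lst i ""
          if d.contains letter then d.modify letter 0 (· + 1) else d.insert letter 1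
        else d) (PySem.Dict.empty : PySem.Dict String Int)
      letter_count.values.any (fun c => 3 ≤ c))

-- ===== PORT B =====
def check_lists_similarity_alt (lists : List (List String)) : Bool :=
  match lists with
  | [] => false
  | first :: rest =>
    let n := first.length
    let counts := (first :: rest).foldl (fun d lst =>
      (PySem.List.enumerate (lst.take n) 0).foldl (fun d p => d.modify p 0 (· + 1)) d)
      (PySem.Dict.empty : PySem.Dict (Int × String) Int)
    counts.values.any (fun c => 3 ≤ c)

-- ===== PRECONDITION & SPEC =====
def Spec_check_lists_similarity (lists : List (List String)) (out : Bool) : Prop := out = check_lists_similarity_alt lists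
instance (lists : List (List String)) (out : Bool) : Decidable (Spec_check_lists_similarity lists out) := by unfold Spec_check_lists_similarity; infer_instance

-- ===== CLAIM (what is proved, stated in full; the proofs are below) =====
def Claim_equal_check_lists_similarity : Prop := ∀ (lists : List (List String)), Dom_check_lists_similarity lists → Spec_check_lists_similarity lists (check_lists_similarity lists)

-- ===== LEMMAS AND PROOFS =====

-- the column of letters A counts at position i: one per list long enough
def pvCol (i : Int) (ls : List (List String)) : List String :=
  ls.filterMap (fun lst => if i < (lst.length : Int) then some (PySem.List.pyGetD lst i "") else none)

-- the (position, letter) pairs B counts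
def pvPairs (n : Nat) (ls : List (List String)) : List (Int × String) :=
  ls.flatMap (fun lst => PySem.List.enumerate (lst.take n) 0)

lemma pvNodupEnum (cs : List String) : (PySem.List.enumerate cs 0).Nodup :=
  (PySem.List.pairwise_lt_enumerate cs 0).imp
    (fun {a b} hab => by rintro rfl; exact lt_irrefl _ hab)

lemma pvMemEnum (lst : List String) (n : Nat) (i : Int) (s : String)
    (h0 : 0 ≤ i) (hn : i < (n : Int)) :
    ((i, s) ∈ PySem.List.enumerate (lst.take n) 0)
      ↔ (i < (lst.length : Int) ∧ PySem.List.pyGetD lst i "" = s) := by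
  rw [PySem.List.mem_enumerate_iff]
  constructor
  · rintro ⟨k, hk, he⟩
    simp only [List.length_take, lt_min_iff] at hk
    rw [Prod.ext_iff] at he
    obtain ⟨hi, hs⟩ := he
    simp only [zero_add] at hi
    subst hi
    refine ⟨by exact_mod_cast hk.2, ?_⟩
    rw [PySem.List.pyGetD_eq_getElem _ _ (by omega) (by exact_mod_cast hk.2)]
    simp only [Int.toNat_natCast]
    simp only at hs
    simp [hs, List.getElem_take]
  · rintro ⟨hl, hs⟩
    refine ⟨i.toNat, ?_, ?_⟩
    · simp only [List.length_take, lt_min_iff]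
      omega
    · rw [Prod.ext_iff]
      refine ⟨by omega, ?_⟩
      rw [← hs, PySem.List.pyGetD_eq_getElem _ _ h0 hl]
      simp [List.getElem_take]

lemma pvCountEnum (lst : List String) (n : Nat) (i : Int) (s : String)
    (h0 : 0 ≤ i) (hn : i < (n : Int)) :
    List.count (i, s) (PySem.List.enumerate (lst.take n) 0)
      = if i < (lst.length : Int) ∧ PySem.List.pyGetD lst i "" = s then 1 else 0 := by
  rw [List.Nodup.count (pvNodupEnum (lst.take n)),
      if_congr (pvMemEnum lst n i s h0 hn) rfl rfl]

lemma pvCountPairs (ls : List (List String)) (n : Nat) (i : Int) (s : String)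
    (h0 : 0 ≤ i) (hn : i < (n : Int)) :
    List.count (i, s) (pvPairs n ls) = List.count s (pvCol i ls) := by
  induction ls with
  | nil => rfl
  | cons a t ih =>
    simp only [pvPairs, pvCol] at ih
    simp only [pvPairs, pvCol, List.flatMap_cons, List.count_append, List.filterMap_cons]
    rw [pvCountEnum a n i s h0 hn]
    by_cases hg : i < (a.length : Int)
    · by_cases hs : PySem.List.pyGetD a i "" = s
      · simp [hg, hs, ih]
        try omega
      · simp [hg, hs, ih]
        try omega
    · simp [hg, ih]
      try omega

lemma pvPairsBound (ls : List (List String)) (n : Nat) (p : Int × String)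
    (hp : p ∈ pvPairs n ls) : 0 ≤ p.1 ∧ p.1 < (n : Int) := by
  simp only [pvPairs, List.mem_flatMap] at hp
  obtain ⟨lst, _, hmem⟩ := hp
  rw [PySem.List.mem_enumerate_iff] at hmem
  obtain ⟨k, hk, he⟩ := hmem
  simp only [List.length_take, lt_min_iff] at hk
  rw [Prod.ext_iff] at he
  obtain ⟨hi, -⟩ := he
  simp only [zero_add] at hi
  constructor <;> omega

lemma pvFoldA (i : Int) (ls : List (List String)) (d : PySem.Dict String Int) :
    ls.foldl (fun d lst =>
        if i < (lst.length : Int) then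
          let letter := PySem.List.pyGetD lst i ""
          if d.contains letter then d.modify letter 0 (· + 1) else d.insert letter 1
        else d) d
      = (pvCol i ls).foldl (fun d x => d.modify x 0 (· + 1)) d := by
  induction ls generalizing d with
  | nil => rfl
  | cons a t ih =>
    simp only [List.foldl_cons, pvCol, List.filterMap_cons]
    by_cases hg : i < (a.length : Int)
    · simp only [hg, if_pos, List.foldl_cons]
      by_cases hc : d.contains (PySem.List.pyGetD a i "")
      · simp [hc, ih, pvCol]
      · simp only [Bool.not_eq_true] at hc ⊢
        rw [show d.insert (PySem.List.pyGetD a i "") 1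
              = d.modify (PySem.List.pyGetD a i "") 0 (· + 1) from by
          simp [PySem.Dict.modify, PySem.Dict.getD_of_not_contains _ _ hc]]
        simp [hc, ih, pvCol]
    · simp [hg, ih, pvCol]

lemma pvFoldB (n : Nat) (ls : List (List String)) (d : PySem.Dict (Int × String) Int) :
    ls.foldl (fun d lst =>
        (PySem.List.enumerate (lst.take n) 0).foldl (fun d p => d.modify p 0 (· + 1)) d) d
      = (pvPairs n ls).foldl (fun d p => d.modify p 0 (· + 1)) d := by
  induction ls generalizing d with
  | nil => rfl
  | cons a t ih => simp [pvPairs, List.flatMap_cons, List.foldl_append, ih]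

lemma pvAnyCounter {α : Type} [BEq α] [LawfulBEq α] (xs : List α) :
    ((PySem.Dict.counter xs : PySem.Dict α Int).values.any (fun c => 3 ≤ c))
      = (PySem.Set.ofList xs).any (fun k => 3 ≤ List.count k xs) := by
  simp only [PySem.Dict.values, PySem.Dict.items_counter, List.map_map, List.any_map]
  refine PySem.List.any_congr_mem (fun x hx => ?_)
  simp

-- ===== VERDICT (by name: the statement is the Claim_ definition above) =====
theorem check_lists_similarity_spec : Claim_equal_check_lists_similarity := by
  intro lists _
  unfold Spec_check_lists_similarity
  match lists with
  | [] => rfl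
  | first :: rest =>
    simp only [check_lists_similarity, check_lists_similarity_alt]
    rw [pvFoldB first.length (first :: rest) PySem.Dict.empty,
        ← PySem.Dict.counter_eq_foldl, pvAnyCounter]
    have hA : ∀ i : Int,
        ((first :: rest).foldl (fun d lst =>
            if i < (lst.length : Int) then
              let letter := PySem.List.pyGetD lst i ""
              if d.contains letter then d.modify letter 0 (· + 1) else d.insert letter 1
            else d) (PySem.Dict.empty : PySem.Dict String Int)).values.any (fun c => 3 ≤ c)
          = (PySem.Set.ofList (pvCol i (first :: rest))).any
              (fun k => 3 ≤ List.count k (pvCol i (first :: rest))) := by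
      intro i
      rw [pvFoldA i (first :: rest) PySem.Dict.empty, ← PySem.Dict.counter_eq_foldl,
          pvAnyCounter]
    simp only [hA]
    rw [Bool.eq_iff_iff]
    simp only [List.any_eq_true, decide_eq_true_iff, PySem.Set.mem_ofList,
      PySem.List.mem_pyRange_one]
    constructor
    · rintro ⟨i, ⟨h0, hn⟩, s, hs, hc⟩
      refine ⟨(i, s), ?_, ?_⟩
      · rw [← List.count_pos_iff, pvCountPairs _ _ _ _ h0 hn]
        omega
      · rw [pvCountPairs _ _ _ _ h0 hn]
        exact hc
    · rintro ⟨⟨i, s⟩, hp, hc⟩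
      obtain ⟨h0, hn⟩ := pvPairsBound (first :: rest) first.length (i, s)
        (by rw [← List.count_pos_iff] at hp ⊢; omega)
      refine ⟨i, ⟨h0, hn⟩, s, ?_, ?_⟩
      · rw [← List.count_pos_iff, ← pvCountPairs _ _ _ _ h0 hn]
        rw [← List.count_pos_iff] at hp
        omega
      · rw [← pvCountPairs _ _ _ _ h0 hn]
        exact hc
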